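-- pv_equiv track=rewrite | github.com/yann-zhong/GENOM_BIM | src/display.py | put_symbols
-- ===== SOURCE A (Python) =====
-- def put_symbols(seq):
--     dict_symbols = {
--         'P':'★',
--         'G':'⯁',
--         'T':'☐',
--         'S':'▣'
--     }
--     for aa in dict_symbols:
--         seq = seq.replace(aa, dict_symbols[aa])
--     return seq
-- ===== SOURCE B (Python) =====
-- def put_symbols(seq):
--     out = []
--     for c in seq:
--         if c == 'P':
--             out.append('★')
--         elif c == 'G':
--             out.append('⯁')
--         elif c == 'T':
--             out.append('☐')
--         elif c == 'S':
--             out.append('▣')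
--         else:
--             out.append(c)
--     return ''.join(out)
-- ===== Notes on version B (the rewrite author's own statement) =====
-- stated objective: simpler
-- what changed: B replaces A's four sequential full-string str.replace passes (driven by a dict) by a single explicit loop over the characters with an if/elif chain that appends the translated character to an output list joined at the end.
import Mathlib
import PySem

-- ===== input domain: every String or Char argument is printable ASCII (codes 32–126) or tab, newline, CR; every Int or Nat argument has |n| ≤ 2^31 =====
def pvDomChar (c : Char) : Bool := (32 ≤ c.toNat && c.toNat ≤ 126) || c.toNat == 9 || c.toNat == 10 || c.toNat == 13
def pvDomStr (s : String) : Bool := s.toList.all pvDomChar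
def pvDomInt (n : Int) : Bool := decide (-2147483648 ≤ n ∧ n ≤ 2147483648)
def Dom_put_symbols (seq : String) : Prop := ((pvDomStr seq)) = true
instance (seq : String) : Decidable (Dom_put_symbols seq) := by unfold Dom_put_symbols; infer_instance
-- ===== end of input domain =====

-- B replaces A's four sequential full-string replace passes by one explicit loop that appends each translated character to an accumulator (simpler).


-- ===== PORT A =====
-- the dict_symbols literal of A (str keys, str values)
def pvSymA : PySem.Dict String String :=
  PySem.Dict.ofList [("P", "★"), ("G", "⯁"), ("T", "☐"), ("S", "▣")]

-- for aa in dict_symbols: seq = seq.replace(aa, dict_symbols[aa])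
def put_symbols (seq : String) : String :=
  pvSymA.keys.foldl (fun s aa => PySem.Str.replace s aa ((pvSymA.get? aa).getD "")) seq

-- ===== PORT B =====
-- out = []; for c in seq: if/elif chain appends the translation; return ''.join(out)
-- (out holds 1-character strings, so the join is String.ofList of the accumulated chars)
def put_symbols_alt (seq : String) : String :=
  String.ofList (seq.toList.foldl (fun out c =>
    if c = 'P' then out ++ ['★']
    else if c = 'G' then out ++ ['⯁']
    else if c = 'T' then out ++ ['☐']
    else if c = 'S' then out ++ ['▣']
    else out ++ [c]) [])

-- ===== PRECONDITION & SPEC =====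
def Spec_put_symbols (seq : String) (out : String) : Prop := out = put_symbols_alt seq
instance (seq : String) (out : String) : Decidable (Spec_put_symbols seq out) := by unfold Spec_put_symbols; infer_instance

-- ===== CLAIM (what is proved, stated in full; the proofs are below) =====
def Claim_equal_put_symbols : Prop := ∀ (seq : String), Dom_put_symbols seq → Spec_put_symbols seq (put_symbols seq)

-- ===== LEMMAS AND PROOFS =====

-- the per-character translation both programs realise
def pvTr (c : Char) : Char :=
  if c = 'P' then '★' else if c = 'G' then '⯁' else if c = 'T' then '☐' else if c = 'S' then '▣' else c

-- replace with a single-character pattern is a per-character flatMap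
lemma pv_go_single (a : Char) (new : List Char) :
    ∀ (l acc : List Char) (fuel : Nat), l.length ≤ fuel →
      PySem.Chars.replace.go [a] new fuel l acc
        = acc.reverse ++ l.flatMap (fun c => if c = a then new else [c]) := by
  intro l
  induction l with
  | nil =>
    intro acc fuel _
    cases fuel <;> simp [PySem.Chars.replace.go]
  | cons c t ih =>
    intro acc fuel hf
    cases fuel with
    | zero => simp at hf
    | succ f =>
      simp only [PySem.Chars.replace.go]
      by_cases hca : c = a
      · subst hca
        have hpre : List.isPrefixOf [c] (c :: t) = true := by simp [List.isPrefixOf]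
        rw [if_pos hpre]
        simp only [List.length_cons, List.length_nil, List.drop_succ_cons, List.drop_zero]
        rw [ih (new.reverse ++ acc) f (by simpa using hf)]
        simp
      · have hpre : List.isPrefixOf [a] (c :: t) = false := by
          simp [List.isPrefixOf]
          intro h; exact absurd h.symm hca
        rw [if_neg (by simp [hpre])]
        rw [ih (c :: acc) f (by simpa using hf)]
        simp [hca]

lemma pv_replace_single (s : List Char) (a : Char) (new : List Char) :
    PySem.Chars.replace s [a] new = s.flatMap (fun c => if c = a then new else [c]) := by
  rw [PySem.Chars.replace]
  simp only [List.isEmpty_cons, Bool.false_eq_true, if_false]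
  rw [pv_go_single a new s [] s.length (le_refl _)]
  simp

-- A's chain of four single-char flatMaps collapses to one map with pvTr
lemma pv_chain (cs : List Char) :
    ((((cs.flatMap (fun c => if c = 'P' then ['★'] else [c])).flatMap
        (fun c => if c = 'G' then ['⯁'] else [c])).flatMap
        (fun c => if c = 'T' then ['☐'] else [c])).flatMap
        (fun c => if c = 'S' then ['▣'] else [c]))
      = cs.map pvTr := by
  induction cs with
  | nil => simp
  | cons c t ih =>
    simp only [List.flatMap_cons, List.flatMap_append, List.map_cons] at *
    rw [ih]
    by_cases h1 : c = 'P'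
    · subst h1; simp [pvTr]
    by_cases h2 : c = 'G'
    · subst h2; simp [pvTr]
    by_cases h3 : c = 'T'
    · subst h3; simp [pvTr]
    by_cases h4 : c = 'S'
    · subst h4; simp [pvTr]
    · simp [pvTr, h1, h2, h3, h4]

lemma pv_A_toList (seq : String) :
    (put_symbols seq).toList = seq.toList.map pvTr := by
  have hk : pvSymA.keys = ["P", "G", "T", "S"] := rfl
  rw [put_symbols, hk]
  simp only [List.foldl]
  have g1 : (pvSymA.get? "P").getD "" = "★" := rfl
  have g2 : (pvSymA.get? "G").getD "" = "⯁" := rfl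
  have g3 : (pvSymA.get? "T").getD "" = "☐" := rfl
  have g4 : (pvSymA.get? "S").getD "" = "▣" := rfl
  rw [g1, g2, g3, g4]
  simp only [PySem.Str.toList_replace]
  rw [show ("P" : String).toList = ['P'] from rfl, show ("★" : String).toList = ['★'] from rfl,
      show ("G" : String).toList = ['G'] from rfl, show ("⯁" : String).toList = ['⯁'] from rfl,
      show ("T" : String).toList = ['T'] from rfl, show ("☐" : String).toList = ['☐'] from rfl,
      show ("S" : String).toList = ['S'] from rfl, show ("▣" : String).toList = ['▣'] from rfl]
  rw [pv_replace_single, pv_replace_single, pv_replace_single, pv_replace_single]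
  exact pv_chain seq.toList

-- B's appending loop, run from any accumulator, produces acc ++ the single-pass map
lemma pv_B_foldl (cs : List Char) : ∀ acc : List Char,
    cs.foldl (fun out c =>
      if c = 'P' then out ++ ['★']
      else if c = 'G' then out ++ ['⯁']
      else if c = 'T' then out ++ ['☐']
      else if c = 'S' then out ++ ['▣']
      else out ++ [c]) acc = acc ++ cs.map pvTr := by
  induction cs with
  | nil => intro acc; simp
  | cons c t ih =>
    intro acc
    simp only [List.foldl_cons, List.map_cons]
    rw [ih]
    by_cases h1 : c = 'P'
    · subst h1; simp [pvTr]
    by_cases h2 : c = 'G'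
    · subst h2; simp [pvTr, h1]
    by_cases h3 : c = 'T'
    · subst h3; simp [pvTr, h1, h2]
    by_cases h4 : c = 'S'
    · subst h4; simp [pvTr, h1, h2, h3]
    · simp [pvTr, h1, h2, h3, h4]

lemma pv_B_toList (seq : String) :
    (put_symbols_alt seq).toList = seq.toList.map pvTr := by
  rw [put_symbols_alt]
  rw [pv_B_foldl seq.toList []]
  simp

-- ===== VERDICT (by name: the statement is the Claim_ definition above) =====
theorem put_symbols_spec : Claim_equal_put_symbols := by
  intro seq _
  unfold Spec_put_symbols
  apply String.ext
  rw [pv_A_toList, pv_B_toList]
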